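-- pv_equiv track=rewrite | github.com/V0es/discord-bot | tests/parse_news_test.py | _parse_news_args
-- ===== SOURCE A (Python) =====
-- news_categories = {
--     'business' : 'бизнес',
--     'entertainment' : 'развлечения',
--     'general' : 'общие',
--     'health' : 'здоровье',
--     'science' : 'наука',
--     'sports' : 'спорт',
--     'technology' : 'технологии',
-- }
--
-- def _parse_news_args(news_args : str):
--         arg_list = news_args.split(':')
--         news_args = {
--             'category' : None,
--             'keyword' : None,
--             'num' : None
--         }
--
--         if not len(arg_list):
--             return None
--         for arg in arg_list:
--
--             if arg in news_categories.keys():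
--                 news_args['category'] = arg
--                 continue
--
--             else:
--                 try:
--                     arg = int(arg)
--                     news_args['num'] = str(arg)
--                     continue
--                 except ValueError:
--                     news_args['keyword'] = arg
--                     continue
--         return news_args
-- ===== SOURCE B (Python) =====
-- news_categories = {
--     'business' : 'бизнес',
--     'entertainment' : 'развлечения',
--     'general' : 'общие',
--     'health' : 'здоровье',
--     'science' : 'наука',
--     'sports' : 'спорт',
--     'technology' : 'технологии',
-- }
--
-- def _parse_news_args(news_args : str):
--     arg_list = news_args.split(':')
--
--     def as_num(x):
--         try:
--             return str(int(x))
--         except ValueError: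
--             return None
--
--     category = next((a for a in reversed(arg_list) if a in news_categories), None)
--     rest = [a for a in arg_list if a not in news_categories]
--     num_arg = next((a for a in reversed(rest) if as_num(a) is not None), None)
--     num = None if num_arg is None else as_num(num_arg)
--     keyword = next((a for a in reversed(rest) if as_num(a) is None), None)
--     return {'category': category, 'keyword': keyword, 'num': num}
-- ===== Notes on version B (the rewrite author's own statement) =====
-- stated objective: alternative
-- what changed: Replaces A's single pass that mutates a 3-key dict with three independent last-match searches: category = last split element that is a category key, and over the non-category elements only, num = str(int(x)) of the last int-parsable element and keyword = the last non-int-parsable element.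
import Mathlib
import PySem

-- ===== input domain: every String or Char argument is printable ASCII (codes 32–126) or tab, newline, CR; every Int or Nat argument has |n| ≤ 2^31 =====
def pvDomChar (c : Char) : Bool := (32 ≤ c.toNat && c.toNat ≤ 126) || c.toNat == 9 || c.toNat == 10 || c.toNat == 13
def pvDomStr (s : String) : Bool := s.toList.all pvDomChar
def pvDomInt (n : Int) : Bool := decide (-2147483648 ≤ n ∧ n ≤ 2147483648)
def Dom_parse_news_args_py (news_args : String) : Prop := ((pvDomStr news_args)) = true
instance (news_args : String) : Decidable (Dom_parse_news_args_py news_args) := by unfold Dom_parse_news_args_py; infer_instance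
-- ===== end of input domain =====

-- B computes the three result fields by separate backward searches (last matching element)
-- instead of A's single mutating dict pass; objective: alternative decomposition, same cost.


-- ===== PORT A =====
-- module-level constant: the keys of news_categories (only the keys are ever used)
def newsCategoryKeys : List String :=
  ["business", "entertainment", "general", "health", "science", "sports", "technology"]

-- literal port of A's single pass over the split list, mutating a 3-key dict.
-- A's 'if not len(arg_list): return None' guard is dead code: str.split(sep) always
-- returns a non-empty list (and None is not a value of the return type), so it is omitted.
def parse_news_args_py (news_args : String) : List (String × Option String) :=
  let arg_list : List String := (PySem.Chars.splitOn news_args.toList [':']).map String.ofList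
  let d0 : PySem.Dict String (Option String) :=
    PySem.Dict.mk [("category", none), ("keyword", none), ("num", none)]
  (arg_list.foldl (fun d arg =>
      if newsCategoryKeys.contains arg then
        d.insert "category" (some arg)
      else
        match PySem.Int.ofStr? arg with
        | some v => d.insert "num" (some (PySem.Int.toStr v))
        | none   => d.insert "keyword" (some arg)) d0).items

-- ===== PORT B =====
-- as_num(x): str(int(x)) if int() accepts x, else None
def asNum (x : String) : Option String := (PySem.Int.ofStr? x).map PySem.Int.toStr

-- B: category = last split element that is a category key; among the non-category
-- elements, num comes from the last int-like one and keyword is the last non-int-like one.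
def parse_news_args_py_alt (news_args : String) : List (String × Option String) :=
  let arg_list : List String := (PySem.Chars.splitOn news_args.toList [':']).map String.ofList
  let category := arg_list.reverse.find? (fun a => newsCategoryKeys.contains a)
  let rest := arg_list.filter (fun a => !newsCategoryKeys.contains a)
  let numArg := rest.reverse.find? (fun a => (asNum a).isSome)
  let num := numArg.bind asNum
  let keyword := rest.reverse.find? (fun a => (asNum a).isNone)
  [("category", category), ("keyword", keyword), ("num", num)]

-- ===== PRECONDITION & SPEC =====
def Spec_parse_news_args_py (news_args : String) (out : List (String × Option String)) : Prop := out = parse_news_args_py_alt news_args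
instance (news_args : String) (out : List (String × Option String)) : Decidable (Spec_parse_news_args_py news_args out) := by unfold Spec_parse_news_args_py; infer_instance

-- ===== CLAIM (what is proved, stated in full; the proofs are below) =====
def Claim_equal_parse_news_args_py : Prop := ∀ (news_args : String), Dom_parse_news_args_py news_args → Spec_parse_news_args_py news_args (parse_news_args_py news_args)

-- ===== LEMMAS AND PROOFS =====

-- "last element of l satisfying p, else default c" as a left fold
theorem foldl_last_sat {α : Type} (p : α → Bool) :
    ∀ (l : List α) (c : Option α),
      l.foldl (fun acc a => if p a then some a else acc) c = (l.reverse.find? p).or c := by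
  intro l
  induction l with
  | nil => intro c; simp
  | cons a l ih =>
    intro c
    simp only [List.foldl_cons, List.reverse_cons, List.find?_append, ih]
    cases h : p a <;> simp [List.find?, h]

-- "last (f a) that is some, else default c" as a left fold
theorem foldl_last_some {α β : Type} (f : α → Option β) :
    ∀ (l : List α) (c : Option β),
      l.foldl (fun acc a => (f a).or acc) c
        = ((l.reverse.find? (fun a => (f a).isSome)).bind f).or c := by
  intro l
  induction l with
  | nil => intro c; simp
  | cons a l ih =>
    intro c
    simp only [List.foldl_cons, List.reverse_cons, List.find?_append, ih]
    cases hfa : f a with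
    | none =>
      have : (List.find? (fun a => (f a).isSome) [a]) = none := by
        simp [List.find?, hfa]
      simp [this]
    | some b =>
      have h1 : (List.find? (fun a => (f a).isSome) [a]) = some a := by
        simp [List.find?, hfa]
      rw [h1]
      cases hf : l.reverse.find? (fun a => (f a).isSome) with
      | none => simp [hfa]
      | some w =>
        have hw : (f w).isSome := by simpa using List.find?_some hf
        cases hfw : f w with
        | none => rw [hfw] at hw; simp at hw
        | some u => simp [hfw]

-- invariant of A's loop: the dict's three values are the three "last such element" folds
theorem loop_invariant :
    ∀ (l : List String) (c k n : Option String),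
      (l.foldl (fun d arg =>
          if newsCategoryKeys.contains arg then
            d.insert "category" (some arg)
          else
            match PySem.Int.ofStr? arg with
            | some v => d.insert "num" (some (PySem.Int.toStr v))
            | none   => d.insert "keyword" (some arg))
        (PySem.Dict.mk [("category", c), ("keyword", k), ("num", n)])).items
      = [("category", l.foldl (fun acc a => if newsCategoryKeys.contains a then some a else acc) c),
         ("keyword", l.foldl (fun acc a =>
            if newsCategoryKeys.contains a then acc
            else if (asNum a).isNone then some a else acc) k),
         ("num", l.foldl (fun acc a =>
            if newsCategoryKeys.contains a then acc else (asNum a).or acc) n)] := by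
  intro l
  induction l with
  | nil => intro c k n; rfl
  | cons a l ih =>
    intro c k n
    simp only [List.foldl_cons]
    cases hc : newsCategoryKeys.contains a with
    | true =>
      have hstep : (PySem.Dict.mk [("category", c), ("keyword", k), ("num", n)]).insert
          "category" (some a) = PySem.Dict.mk [("category", some a), ("keyword", k), ("num", n)] := rfl
      simp only [reduceIte]
      rw [hstep, ih]
    | false =>
      cases hi : PySem.Int.ofStr? a with
      | some v =>
        have hstep : (PySem.Dict.mk [("category", c), ("keyword", k), ("num", n)]).insert
            "num" (some (PySem.Int.toStr v))
            = PySem.Dict.mk [("category", c), ("keyword", k), ("num", some (PySem.Int.toStr v))] := rfl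
        have han : asNum a = some (PySem.Int.toStr v) := by simp [asNum, hi]
        simp only [han, Option.isNone_some, Option.some_or, Bool.false_eq_true, reduceIte]
        rw [hstep, ih]
      | none =>
        have hstep : (PySem.Dict.mk [("category", c), ("keyword", k), ("num", n)]).insert
            "keyword" (some a)
            = PySem.Dict.mk [("category", c), ("keyword", some a), ("num", n)] := rfl
        have han : asNum a = none := by simp [asNum, hi]
        simp only [han, Option.isNone_none, Option.none_or, Bool.false_eq_true, reduceIte]
        rw [hstep, ih]

-- ===== VERDICT (by name: the statement is the Claim_ definition above) =====
theorem parse_news_args_py_spec : Claim_equal_parse_news_args_py := by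
  intro news_args _
  unfold Spec_parse_news_args_py parse_news_args_py parse_news_args_py_alt
  set l : List String := (PySem.Chars.splitOn news_args.toList [':']).map String.ofList with hl
  clear hl
  rw [show (PySem.Dict.mk [(("category" : String), (none : Option String)), ("keyword", none), ("num", none)]) =
      PySem.Dict.mk [("category", none), ("keyword", none), ("num", none)] from rfl]
  rw [loop_invariant l none none none]
  congr 1
  · -- category
    rw [foldl_last_sat _ l none, Option.or_none]
  congr 1
  · -- keyword
    have h1 : l.foldl (fun acc a =>
        if newsCategoryKeys.contains a then acc
        else if (asNum a).isNone then some a else acc) none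
        = (l.filter (fun a => !newsCategoryKeys.contains a)).foldl
            (fun acc a => if (asNum a).isNone then some a else acc) none := by
      rw [← PySem.List.foldl_if_eq_foldl_filter]
      apply PySem.List.foldl_congr_mem
      intro acc a _
      cases newsCategoryKeys.contains a <;> simp
    rw [h1, foldl_last_sat _ _ none, Option.or_none]
  · -- num
    have h1 : l.foldl (fun acc a =>
        if newsCategoryKeys.contains a then acc else (asNum a).or acc) none
        = (l.filter (fun a => !newsCategoryKeys.contains a)).foldl
            (fun acc a => (asNum a).or acc) none := by
      rw [← PySem.List.foldl_if_eq_foldl_filter]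
      apply PySem.List.foldl_congr_mem
      intro acc a _
      cases newsCategoryKeys.contains a <;> simp
    rw [h1, foldl_last_some _ _ none, Option.or_none]
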